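-- pv_equiv track=rewrite | github.com/FanchenBao/leetcode | Contest_280/LeetCode_2172.py | maximumANDSum
-- ===== SOURCE A (Python) =====
-- from typing import List
-- from functools import lru_cache
--
-- def maximumANDSum(nums: List[int], numSlots: int) -> int:
--     """What a problem!
--
--     Once I know the trick of using a trinary bit to represent the state of
--     each slot, as per lee215's explanation
--
--     https://leetcode.com/problems/maximum-and-sum-of-array/discuss/1766824/JavaC%2B%2BPython-DP-Solution
--
--     the problem becomes very straightforward. Since can create an integer
--     using the trinary bits, we can represent the state of all the slots as
--     an integer. Then we simply iterate through all possible configurations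
--     of assigning a number to a slot, using DP, and then find the max.
--
--     The trick that I use to find the value of the ith bit from the right in
--     a trinary mask is mask // (3**(i - 1)) % 3. This is the numerical way
--     of expressing mask >> (i - 1) & 1 for a binary system.
--
--     O(N * 3^N) where N = len(numSlots), 1107 ms, 50% ranking.
--     """
--     @lru_cache(maxsize=None)
--     def dp(idx: int, mask: int) -> int:
--         if idx < 0:
--             return 0
--         res = 0
--         for slot in range(1, numSlots + 1):
--             if (mask // (3**(slot - 1)) % 3) < 2:
--                 res = max(res, dp(idx - 1, mask + 3**(slot - 1)) + (nums[idx] & slot))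
--         return res
--
--     return dp(len(nums) - 1, 0)
-- ===== SOURCE B (Python) =====
-- def maximumANDSum(nums, numSlots):
--     # Iterative layered tabulation over reachable trinary masks (no recursion, no lru_cache):
--     # levels[s] = masks reachable after assigning s numbers, in discovery order.
--     n = len(nums)
--     levels = [[0]]
--     for _ in range(1, n):
--         nxt = []
--         for m in levels[-1]:
--             for slot in range(1, numSlots + 1):
--                 if m // 3 ** (slot - 1) % 3 < 2:
--                     m2 = m + 3 ** (slot - 1)
--                     if m2 not in nxt:
--                         nxt.append(m2)
--         levels.append(nxt)
--     # backward pass: value of each reachable state, from the deepest layer up.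
--     prev = {}
--     for s in range(n - 1, -1, -1):
--         x = nums[n - 1 - s]
--         cur = {}
--         for m in levels[s]:
--             best = 0
--             for slot in range(1, numSlots + 1):
--                 if m // 3 ** (slot - 1) % 3 < 2:
--                     v = (x & slot) + prev.get(m + 3 ** (slot - 1), 0)
--                     if v > best:
--                         best = v
--             cur[m] = best
--         prev = cur
--     return prev.get(0, 0)
-- ===== Notes on version B (the rewrite author's own statement) =====
-- stated objective: alternative
-- what changed: Replaces the lru_cache top-down recursion by explicit bottom-up tabulation: layers of reachable trinary masks are built forward, then a backward pass fills a per-layer dict of state values; no recursion and no memo cache.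
import Mathlib
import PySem

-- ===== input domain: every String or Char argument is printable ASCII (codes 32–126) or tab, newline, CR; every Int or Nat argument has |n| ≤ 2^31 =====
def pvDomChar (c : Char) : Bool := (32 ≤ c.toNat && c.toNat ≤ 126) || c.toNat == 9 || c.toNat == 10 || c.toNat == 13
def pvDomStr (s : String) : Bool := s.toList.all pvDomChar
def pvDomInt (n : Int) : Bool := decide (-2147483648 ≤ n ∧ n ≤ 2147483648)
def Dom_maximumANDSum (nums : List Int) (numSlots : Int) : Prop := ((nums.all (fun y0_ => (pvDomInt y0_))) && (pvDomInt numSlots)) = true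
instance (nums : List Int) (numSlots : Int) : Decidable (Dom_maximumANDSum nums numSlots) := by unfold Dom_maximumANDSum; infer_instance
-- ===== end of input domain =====

-- B replaces A's lru_cache top-down recursion by an iterative bottom-up tabulation over
-- layers of reachable trinary masks (objective: alternative decomposition; return value only).

-- ===== PORT A =====
-- inner recursive dp(idx, mask) of A (lru_cache dropped: memoisation does not change the value)
def dpA (nums : List Int) (numSlots : Int) (idx mask : Int) : Int :=
  if idx < 0 then 0
  else
    (PySem.List.pyRange 1 (numSlots + 1) 1).foldl
      (fun res slot =>
        if PySem.Int.mod (PySem.Int.floordiv mask ((3 : Int) ^ (slot - 1).toNat)) 3 < 2 then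
          max res (dpA nums numSlots (idx - 1) (mask + (3 : Int) ^ (slot - 1).toNat)
                    + PySem.Int.band (PySem.List.pyGetD nums idx 0) slot)
        else res) 0
termination_by (idx + 1).toNat
decreasing_by omega

def maximumANDSum (nums : List Int) (numSlots : Int) : Int :=
  dpA nums numSlots ((nums.length : Int) - 1) 0

-- ===== PORT B =====
-- one forward step: next layer of reachable masks (B's `nxt` loop)
def nextLevelB (numSlots : Int) (cur : List Int) : List Int :=
  cur.foldl (fun nxt m =>
    (PySem.List.pyRange 1 (numSlots + 1) 1).foldl (fun nxt slot =>
      if PySem.Int.mod (PySem.Int.floordiv m ((3 : Int) ^ (slot - 1).toNat)) 3 < 2 then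
        if (m + (3 : Int) ^ (slot - 1).toNat) ∈ nxt then nxt
        else nxt ++ [m + (3 : Int) ^ (slot - 1).toNat]
      else nxt) nxt) []

-- B's `levels` list (levels[-1] is the last layer)
def levelsB (nums : List Int) (numSlots : Int) : List (List Int) :=
  (PySem.List.pyRange 1 (nums.length : Int) 1).foldl
    (fun ls _ => ls ++ [nextLevelB numSlots (PySem.List.pyGetD ls (-1) [])]) [[0]]

-- one backward step: the dict `cur` for layer s from the dict `prev` of layer s+1
def stepB (nums : List Int) (numSlots : Int) (levels : List (List Int))
    (prev : PySem.Dict Int Int) (s : Int) : PySem.Dict Int Int :=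
  (PySem.List.pyGetD levels s []).foldl
    (fun cur m =>
      cur.insert m
        ((PySem.List.pyRange 1 (numSlots + 1) 1).foldl
          (fun best slot =>
            if PySem.Int.mod (PySem.Int.floordiv m ((3 : Int) ^ (slot - 1).toNat)) 3 < 2 then
              if best < PySem.Int.band (PySem.List.pyGetD nums ((nums.length : Int) - 1 - s) 0) slot
                        + prev.getD (m + (3 : Int) ^ (slot - 1).toNat) 0 then
                PySem.Int.band (PySem.List.pyGetD nums ((nums.length : Int) - 1 - s) 0) slot
                  + prev.getD (m + (3 : Int) ^ (slot - 1).toNat) 0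
              else best
            else best) 0))
    PySem.Dict.empty

def maximumANDSum_alt (nums : List Int) (numSlots : Int) : Int :=
  ((PySem.List.pyRange ((nums.length : Int) - 1) (-1) (-1)).foldl
      (stepB nums numSlots (levelsB nums numSlots)) PySem.Dict.empty).getD 0 0

-- ===== PRECONDITION & SPEC =====
def Spec_maximumANDSum (nums : List Int) (numSlots : Int) (out : Int) : Prop := out = maximumANDSum_alt nums numSlots
instance (nums : List Int) (numSlots : Int) (out : Int) : Decidable (Spec_maximumANDSum nums numSlots out) := by unfold Spec_maximumANDSum; infer_instance

-- ===== CLAIM (what is proved, stated in full; the proofs are below) =====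
def Claim_equal_maximumANDSum : Prop := ∀ (nums : List Int) (numSlots : Int), Dom_maximumANDSum nums numSlots → Spec_maximumANDSum nums numSlots (maximumANDSum nums numSlots)

-- ===== LEMMAS AND PROOFS =====

-- the k-th layer as pure iteration of nextLevelB
def iterLvl (numSlots : Int) : Nat → List Int
  | 0 => [0]
  | k + 1 => nextLevelB numSlots (iterLvl numSlots k)

theorem mem_inner_mono (m : Int) (slots : List Int) (acc : List Int) (a : Int)
    (h : a ∈ acc) :
    a ∈ slots.foldl (fun nxt slot =>
      if PySem.Int.mod (PySem.Int.floordiv m ((3 : Int) ^ (slot - 1).toNat)) 3 < 2 then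
        if (m + (3 : Int) ^ (slot - 1).toNat) ∈ nxt then nxt
        else nxt ++ [m + (3 : Int) ^ (slot - 1).toNat]
      else nxt) acc := by
  induction slots generalizing acc with
  | nil => exact h
  | cons s rest ih =>
    apply ih
    dsimp only
    split
    · split
      · exact h
      · exact List.mem_append_left _ h
    · exact h

theorem mem_outer_mono (numSlots : Int) (cur : List Int) (acc : List Int) (a : Int)
    (h : a ∈ acc) :
    a ∈ cur.foldl (fun nxt m =>
      (PySem.List.pyRange 1 (numSlots + 1) 1).foldl (fun nxt slot =>
        if PySem.Int.mod (PySem.Int.floordiv m ((3 : Int) ^ (slot - 1).toNat)) 3 < 2 then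
          if (m + (3 : Int) ^ (slot - 1).toNat) ∈ nxt then nxt
          else nxt ++ [m + (3 : Int) ^ (slot - 1).toNat]
        else nxt) nxt) acc := by
  induction cur generalizing acc with
  | nil => exact h
  | cons c rest ih => exact ih _ (mem_inner_mono c _ acc a h)

theorem mem_inner_of_mem (m slot : Int) (slots : List Int) (acc : List Int)
    (hs : slot ∈ slots)
    (hc : PySem.Int.mod (PySem.Int.floordiv m ((3 : Int) ^ (slot - 1).toNat)) 3 < 2) :
    (m + (3 : Int) ^ (slot - 1).toNat) ∈ slots.foldl (fun nxt slot =>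
      if PySem.Int.mod (PySem.Int.floordiv m ((3 : Int) ^ (slot - 1).toNat)) 3 < 2 then
        if (m + (3 : Int) ^ (slot - 1).toNat) ∈ nxt then nxt
        else nxt ++ [m + (3 : Int) ^ (slot - 1).toNat]
      else nxt) acc := by
  induction slots generalizing acc with
  | nil => cases hs
  | cons s rest ih =>
    rcases List.mem_cons.1 hs with h | h
    · subst h
      rw [List.foldl_cons]
      apply mem_inner_mono
      beta_reduce
      rw [if_pos hc]
      split
      · assumption
      · exact List.mem_append_right _ (List.mem_singleton.2 rfl)
    · exact ih _ h

theorem closure_nextLevelB (numSlots m slot : Int) (cur : List Int)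
    (hm : m ∈ cur) (hs : slot ∈ PySem.List.pyRange 1 (numSlots + 1) 1)
    (hc : PySem.Int.mod (PySem.Int.floordiv m ((3 : Int) ^ (slot - 1).toNat)) 3 < 2) :
    (m + (3 : Int) ^ (slot - 1).toNat) ∈ nextLevelB numSlots cur := by
  unfold nextLevelB
  have main : ∀ (l : List Int) (acc : List Int), m ∈ l →
      (m + (3 : Int) ^ (slot - 1).toNat) ∈ l.foldl (fun nxt m =>
        (PySem.List.pyRange 1 (numSlots + 1) 1).foldl (fun nxt slot =>
          if PySem.Int.mod (PySem.Int.floordiv m ((3 : Int) ^ (slot - 1).toNat)) 3 < 2 then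
            if (m + (3 : Int) ^ (slot - 1).toNat) ∈ nxt then nxt
            else nxt ++ [m + (3 : Int) ^ (slot - 1).toNat]
          else nxt) nxt) acc := by
    intro l
    induction l with
    | nil => intro acc h; cases h
    | cons c rest ih =>
      intro acc h
      rcases List.mem_cons.1 h with h | h
      · subst h
        exact mem_outer_mono numSlots rest _ _ (mem_inner_of_mem m slot _ acc hs hc)
      · exact ih _ h
  exact main cur [] hm

theorem levelsB_eq (nums : List Int) (numSlots : Int) (hn : 1 ≤ nums.length) :
    levelsB nums numSlots = (List.range nums.length).map (iterLvl numSlots) := by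
  unfold levelsB
  have step : ∀ (l : List Int) (i : Nat),
      l.foldl (fun ls _ => ls ++ [nextLevelB numSlots (PySem.List.pyGetD ls (-1) [])])
        ((List.range (i + 1)).map (iterLvl numSlots))
      = (List.range (i + 1 + l.length)).map (iterLvl numSlots) := by
    intro l
    induction l with
    | nil => intro i; simp
    | cons a rest ih =>
      intro i
      have hne : ((List.range (i + 1)).map (iterLvl numSlots)) ≠ [] := by simp
      have hlast : ((List.range (i + 1)).map (iterLvl numSlots)).getLast hne
          = iterLvl numSlots i := by
        rw [List.getLast_eq_getElem]
        simp
      have h1 : PySem.List.pyGetD ((List.range (i + 1)).map (iterLvl numSlots)) (-1) []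
          = iterLvl numSlots i := by
        rw [PySem.List.pyGetD_neg_one _ _ hne, hlast]
      simp only [List.foldl_cons, h1]
      have h2 : (List.range (i + 1)).map (iterLvl numSlots) ++ [nextLevelB numSlots (iterLvl numSlots i)]
          = (List.range (i + 2)).map (iterLvl numSlots) := by
        simp [List.range_succ, iterLvl]
      rw [h2]
      have := ih (i + 1)
      simpa [Nat.add_assoc, Nat.add_comm, Nat.add_left_comm] using this
  have h0 : ([[0]] : List (List Int)) = (List.range 1).map (iterLvl numSlots) := by
    simp [iterLvl]
  rw [h0]
  have hlen : 0 + 1 + (PySem.List.pyRange 1 (nums.length : Int) 1).length = nums.length := by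
    rw [PySem.List.length_pyRange_one]; omega
  rw [step (PySem.List.pyRange 1 (nums.length : Int) 1) 0, hlen]

-- getD after folding inserts whose value depends only on the key
theorem getD_foldl_insert (l : List Int) (g : Int → Int) (d : PySem.Dict Int Int) (m : Int) :
    (l.foldl (fun c m => c.insert m (g m)) d).getD m 0
      = if m ∈ l then g m else d.getD m 0 := by
  induction l generalizing d with
  | nil => simp
  | cons a rest ih =>
    simp only [List.foldl_cons]
    rw [ih]
    by_cases h1 : m ∈ rest <;> by_cases h2 : m = a <;>
      simp [h1, h2, List.mem_cons, PySem.Dict.getD_insert]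

-- the k-th layer of levelsB, as read by stepB
theorem lvl_read (nums : List Int) (numSlots : Int) (k : Nat) (hk : k < nums.length) :
    PySem.List.pyGetD (levelsB nums numSlots) (k : Int) [] = iterLvl numSlots k := by
  rw [levelsB_eq nums numSlots (by omega)]
  rw [PySem.List.pyGetD_natCast]
  rw [List.getD_eq_getElem?_getD]
  simp [hk]

theorem lvl_read_oob (nums : List Int) (numSlots : Int) (k : Nat) (hk : nums.length ≤ k)
    (hn : 1 ≤ nums.length) :
    PySem.List.pyGetD (levelsB nums numSlots) (k : Int) [] = [] := by
  rw [levelsB_eq nums numSlots hn]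
  rw [PySem.List.pyGetD_natCast]
  rw [List.getD_eq_getElem?_getD]
  have h : (List.range nums.length)[k]? = none := by
    rw [List.getElem?_eq_none_iff]; simpa using hk
  simp [h]

-- invariant carried by the backward pass
def InvB (nums : List Int) (numSlots : Int) (k : Nat) (prev : PySem.Dict Int Int) : Prop :=
  ∀ m : Int, prev.getD m 0
    = if m ∈ PySem.List.pyGetD (levelsB nums numSlots) (k : Int) []
      then dpA nums numSlots ((nums.length : Int) - 1 - k) m else 0

theorem if_lt_eq_max (a b : Int) : (if a < b then b else a) = max a b := by
  split <;> omega

theorem stepB_inv (nums : List Int) (numSlots : Int) (k : Nat) (hk : k < nums.length)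
    (prev : PySem.Dict Int Int) (hprev : InvB nums numSlots (k + 1) prev) :
    InvB nums numSlots k (stepB nums numSlots (levelsB nums numSlots) prev (k : Int)) := by
  intro m
  unfold stepB
  rw [getD_foldl_insert]
  by_cases hm : m ∈ PySem.List.pyGetD (levelsB nums numSlots) (k : Int) []
  · simp only [hm, if_pos]
    -- show the computed best equals dpA at (n-1-k, m)
    have hidx : ¬ ((nums.length : Int) - 1 - (k : Int) < 0) := by omega
    rw [dpA]
    simp only [hidx, if_neg, not_false_iff]
    apply PySem.List.foldl_congr_mem
    intro best slot hs
    by_cases hc : PySem.Int.mod (PySem.Int.floordiv m ((3 : Int) ^ (slot - 1).toNat)) 3 < 2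
    · simp only [hc, if_pos]
      have hprev' : prev.getD (m + (3 : Int) ^ (slot - 1).toNat) 0
          = dpA nums numSlots ((nums.length : Int) - 1 - (k : Int) - 1)
              (m + (3 : Int) ^ (slot - 1).toNat) := by
        rw [hprev]
        by_cases hkn : k + 1 < nums.length
        · -- the successor mask lies in the next layer
          have hmem : (m + (3 : Int) ^ (slot - 1).toNat)
              ∈ PySem.List.pyGetD (levelsB nums numSlots) ((k : Nat) + 1 : Nat) [] := by
            rw [lvl_read nums numSlots (k + 1) hkn, iterLvl]
            apply closure_nextLevelB numSlots m slot _ _ hs hc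
            rw [lvl_read nums numSlots k hk] at hm
            exact hm
          rw [if_pos hmem]
          congr 1
          push_cast
          ring
        · -- next layer is past the last: both sides are 0
          have hidx0 : (nums.length : Int) - 1 - (k : Int) - 1 < 0 := by omega
          have hnil := lvl_read_oob nums numSlots (k + 1) (by omega) (by omega)
          rw [hnil]
          conv_rhs => rw [dpA]
          rw [if_pos hidx0]
          simp
      rw [hprev', if_lt_eq_max]
      congr 1
      omega
    · simp only [hc, if_neg, not_false_iff]
  · simp only [hm, if_neg, not_false_iff, PySem.Dict.getD_empty]

theorem backward_fold (nums : List Int) (numSlots : Int) :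
    ∀ (k : Nat), k ≤ nums.length → ∀ prev, InvB nums numSlots k prev →
      InvB nums numSlots 0
        ((PySem.List.pyRange ((k : Int) - 1) (-1) (-1)).foldl
          (stepB nums numSlots (levelsB nums numSlots)) prev) := by
  intro k
  induction k with
  | zero =>
    intro _ prev hprev
    rw [PySem.List.pyRange_neg_one_eq_nil (by omega)]
    exact hprev
  | succ k ih =>
    intro hk prev hprev
    have h1 : (((k + 1 : Nat)) : Int) - 1 = (k : Int) := by push_cast; ring
    rw [h1, PySem.List.pyRange_neg_one_cons (by omega), List.foldl_cons]
    exact ih (by omega) _ (stepB_inv nums numSlots k (by omega) prev hprev)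

-- ===== VERDICT (by name: the statement is the Claim_ definition above) =====
theorem maximumANDSum_spec : Claim_equal_maximumANDSum := by
  unfold Claim_equal_maximumANDSum
  intro nums numSlots _
  unfold Spec_maximumANDSum maximumANDSum maximumANDSum_alt
  by_cases hn : nums.length = 0
  · -- empty nums: both sides are 0
    rw [dpA, if_pos (by omega)]
    rw [PySem.List.pyRange_neg_one_eq_nil (by omega)]
    simp
  · have hn1 : 1 ≤ nums.length := by omega
    have hinv : InvB nums numSlots nums.length PySem.Dict.empty := by
      intro m
      rw [lvl_read_oob nums numSlots nums.length (le_refl _) hn1]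
      simp
    have := backward_fold nums numSlots nums.length (le_refl _) PySem.Dict.empty hinv
    have h0 := this 0
    rw [lvl_read nums numSlots 0 (by omega), iterLvl] at h0
    simp only [List.mem_singleton, if_pos] at h0
    rw [h0]
    congr 1
    push_cast
    ring
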